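-- pv_equiv track=rewrite | github.com/carco5/production-document-intelligence-rag-agent | app/ingestion/chunker.py | _adjust_start_forward
-- ===== SOURCE A (Python) =====
-- def _adjust_start_forward(text: str, start: int) -> int:
--     if start <= 0:
--         return 0
--
--     if start >= len(text):
--         return len(text)
--
--     if text[start].isspace():
--         while start < len(text) and text[start].isspace():
--             start += 1
--         return start
--
--     while start < len(text) and not text[start].isspace():
--         start += 1
--
--     while start < len(text) and text[start].isspace():
--         start += 1
--
--     return start
-- ===== SOURCE B (Python) =====
-- def _adjust_start_forward(text: str, start: int) -> int:
--     if start <= 0: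
--         return 0
--     n = len(text)
--     if start >= n:
--         return n
--     rest = text[start:]
--     if rest[0].isspace():
--         return start + len(rest) - len(rest.lstrip())
--     parts = rest.split(None, 1)
--     if len(parts) == 1:
--         return n
--     return n - len(parts[1])
-- ===== Notes on version B (the rewrite author's own statement) =====
-- stated objective: idiomatic
-- what changed: Replaces A's three character-stepping while-loops with length arithmetic over rest = text[start:]: lstrip measures the leading-whitespace run, and split(None, 1) locates the next token after the current word in one library call (C-level scans instead of per-character Python loops).
import Mathlib
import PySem

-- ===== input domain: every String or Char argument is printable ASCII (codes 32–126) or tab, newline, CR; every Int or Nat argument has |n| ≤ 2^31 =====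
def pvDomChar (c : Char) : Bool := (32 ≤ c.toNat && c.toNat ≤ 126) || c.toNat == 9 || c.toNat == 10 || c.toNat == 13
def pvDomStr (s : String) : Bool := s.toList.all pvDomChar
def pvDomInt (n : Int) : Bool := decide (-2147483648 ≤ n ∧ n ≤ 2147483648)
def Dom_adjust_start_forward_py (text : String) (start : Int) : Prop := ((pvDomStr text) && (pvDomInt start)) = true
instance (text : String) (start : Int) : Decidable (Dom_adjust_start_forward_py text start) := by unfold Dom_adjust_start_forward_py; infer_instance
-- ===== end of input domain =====

-- B replaces A's three character-stepping while-loops with length arithmetic on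
-- rest = text[start:] via lstrip and split(None, 1) (idiomatic; same O(n) cost).

-- ===== PORT A =====
-- while start < len(text) and text[start].isspace(): start += 1   (i = index, list = remaining suffix)
def pvLoopWs : Nat → List Char → Nat
  | i, [] => i
  | i, c :: t => if PySem.Chars.isspace c then pvLoopWs (i+1) t else i

-- while start < len(text) and not text[start].isspace(): start += 1
def pvLoopWord : Nat → List Char → Nat × List Char
  | i, [] => (i, [])
  | i, c :: t => if PySem.Chars.isspace c then (i, c :: t) else pvLoopWord (i+1) t

def adjust_start_forward_py (text : String) (start : Int) : Int :=
  if start ≤ 0 then 0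
  else if start ≥ (text.toList.length : Int) then (text.toList.length : Int)
  else
    let cs := text.toList
    if (PySem.List.pyGet? cs start).any PySem.Chars.isspace then
      (pvLoopWs start.toNat (cs.drop start.toNat) : Int)
    else
      let p := pvLoopWord start.toNat (cs.drop start.toNat)
      (pvLoopWs p.1 p.2 : Int)

-- ===== PORT B =====
def adjust_start_forward_py_alt (text : String) (start : Int) : Int :=
  if start ≤ 0 then 0
  else
    let n : Int := (text.toList.length : Int)
    if start ≥ n then n
    else
      let rest := PySem.List.slice text.toList (some start) none
      if (PySem.List.pyGet? rest 0).any PySem.Chars.isspace then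
        start + (rest.length : Int) - ((PySem.Chars.lstrip rest).length : Int)
      else
        let parts := PySem.Chars.split₀Max rest 1
        if parts.length = 1 then n
        else n - (((PySem.List.pyGet? parts 1).getD []).length : Int)

-- ===== PRECONDITION & SPEC =====
def Spec_adjust_start_forward_py (text : String) (start : Int) (out : Int) : Prop := out = adjust_start_forward_py_alt text start
instance (text : String) (start : Int) (out : Int) : Decidable (Spec_adjust_start_forward_py text start out) := by unfold Spec_adjust_start_forward_py; infer_instance

-- ===== CLAIM (what is proved, stated in full; the proofs are below) =====
def Claim_equal_adjust_start_forward_py : Prop := ∀ (text : String) (start : Int), Dom_adjust_start_forward_py text start → Spec_adjust_start_forward_py text start (adjust_start_forward_py text start)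

-- ===== LEMMAS AND PROOFS =====

theorem pvLoopWs_eq (l : List Char) (i : Nat) :
    pvLoopWs i l = i + (l.takeWhile PySem.Chars.isspace).length := by
  induction l generalizing i with
  | nil => simp [pvLoopWs]
  | cons c t ih =>
    by_cases h : PySem.Chars.isspace c
    · simp [pvLoopWs, h, ih]; omega
    · simp [pvLoopWs, h]

theorem pvLoopWord_eq (l : List Char) (i : Nat) :
    pvLoopWord i l = (i + (l.takeWhile (fun c => !PySem.Chars.isspace c)).length,
                      l.dropWhile (fun c => !PySem.Chars.isspace c)) := by
  induction l generalizing i with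
  | nil => simp [pvLoopWord]
  | cons c t ih =>
    by_cases h : PySem.Chars.isspace c
    · simp [pvLoopWord, h]
    · simp [pvLoopWord, h, ih]; omega

theorem pvGoStep (fuel m : Nat) (l : List Char) (acc : List (List Char)) :
    PySem.Chars.split₀Max.go (fuel+1) m l acc =
      match List.dropWhile PySem.Chars.isspace l with
      | [] => acc.reverse
      | l' =>
        if m = 0 then (l' :: acc).reverse
        else PySem.Chars.split₀Max.go fuel (m-1) (List.dropWhile (fun c => !PySem.Chars.isspace c) l')
              (List.takeWhile (fun c => !PySem.Chars.isspace c) l' :: acc) := by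
  rw [PySem.Chars.split₀Max.go]; rfl

theorem pvSplit0Max_one (c : Char) (t : List Char) (hc : PySem.Chars.isspace c = false) :
    PySem.Chars.split₀Max (c :: t) 1 =
      (if ((c :: t).dropWhile (fun c => !PySem.Chars.isspace c)).dropWhile PySem.Chars.isspace = []
       then [(c :: t).takeWhile (fun c => !PySem.Chars.isspace c)]
       else [(c :: t).takeWhile (fun c => !PySem.Chars.isspace c),
             ((c :: t).dropWhile (fun c => !PySem.Chars.isspace c)).dropWhile PySem.Chars.isspace]) := by
  have h1 : PySem.Chars.split₀Max (c :: t) 1 =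
      PySem.Chars.split₀Max.go ((c :: t).length + 1) 1 (c :: t) [] := by
    simp [PySem.Chars.split₀Max]
  rw [h1]
  have hlen : (c :: t).length + 1 = (t.length + 1) + 1 := by simp
  rw [hlen, pvGoStep]
  have hdw1 : List.dropWhile PySem.Chars.isspace (c :: t) = c :: t := by
    simp [hc]
  rw [hdw1]
  simp only [Nat.one_ne_zero, if_false]
  rw [pvGoStep]
  cases hdw : List.dropWhile PySem.Chars.isspace
      (List.dropWhile (fun c => !PySem.Chars.isspace c) (c :: t)) with
  | nil => simp
  | cons a b => simp

theorem pvTwDw (p : Char → Bool) (l : List Char) :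
    (l.takeWhile p).length + (l.dropWhile p).length = l.length := by
  rw [← List.length_append, List.takeWhile_append_dropWhile]

-- ===== VERDICT (by name: the statement is the Claim_ definition above) =====
theorem adjust_start_forward_py_spec : Claim_equal_adjust_start_forward_py := by
  intro text start _
  unfold Spec_adjust_start_forward_py adjust_start_forward_py adjust_start_forward_py_alt
  by_cases h0 : start ≤ 0
  · simp [h0]
  · by_cases h1 : start ≥ (text.toList.length : Int)
    · have h1' : (text.length : Int) ≤ start := by simpa using h1
      simp [h0, h1']
    · push Not at h0 h1
      have hi : ((start.toNat : Int)) = start := Int.toNat_of_nonneg (le_of_lt h0)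
      set i := start.toNat with hidef
      set cs := text.toList with hcs
      have hilen : i < cs.length := by omega
      have hslice : PySem.List.slice cs (some start) none = cs.drop i :=
        PySem.List.slice_from cs (le_of_lt h0)
      have hrest : cs.drop i ≠ [] := by
        simp only [ne_eq, List.drop_eq_nil_iff]; omega
      obtain ⟨c, t, hct⟩ := List.exists_cons_of_ne_nil hrest
      have hget : PySem.List.pyGet? cs start = some c := by
        rw [← hi, PySem.List.pyGet?_natCast, ← List.head?_drop, hct]; rfl
      have hget0 : PySem.List.pyGet? (cs.drop i) 0 = some c := by
        rw [show (0:Int) = ((0:Nat):Int) from rfl, PySem.List.pyGet?_natCast,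
            ← List.head?_drop, List.drop_zero, hct]; rfl
      have hdlen : (cs.drop i).length = cs.length - i := by simp
      simp only [if_neg (not_le.mpr h0), if_neg (not_le.mpr (by exact h1)), ge_iff_le,
        hslice, hget, hget0, Option.any_some]
      by_cases hc : PySem.Chars.isspace c = true
      · simp only [hc, if_true, pvLoopWs_eq]
        have h2 := pvTwDw PySem.Chars.isspace (cs.drop i)
        simp only [PySem.Chars.lstrip]
        push_cast
        omega
      · have hc' : PySem.Chars.isspace c = false := by simpa using hc
        have hsplit : PySem.Chars.split₀Max (cs.drop i) 1 =
            (if ((cs.drop i).dropWhile (fun c => !PySem.Chars.isspace c)).dropWhile PySem.Chars.isspace = []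
             then [(cs.drop i).takeWhile (fun c => !PySem.Chars.isspace c)]
             else [(cs.drop i).takeWhile (fun c => !PySem.Chars.isspace c),
                   ((cs.drop i).dropWhile (fun c => !PySem.Chars.isspace c)).dropWhile PySem.Chars.isspace]) := by
          rw [hct]; exact pvSplit0Max_one c t hc'
        have hTD1 := pvTwDw (fun c => !PySem.Chars.isspace c) (cs.drop i)
        have hTD2 := pvTwDw PySem.Chars.isspace
          ((cs.drop i).dropWhile (fun c => !PySem.Chars.isspace c))
        simp only [hc', if_false, Bool.false_eq_true, pvLoopWord_eq, pvLoopWs_eq, hsplit]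
        by_cases hr2 : ((cs.drop i).dropWhile (fun c => !PySem.Chars.isspace c)).dropWhile PySem.Chars.isspace = []
        · have : (((cs.drop i).dropWhile (fun c => !PySem.Chars.isspace c)).takeWhile PySem.Chars.isspace).length
              = ((cs.drop i).dropWhile (fun c => !PySem.Chars.isspace c)).length := by
            rw [hr2] at hTD2; simpa using hTD2
          simp only [hr2, if_true, List.length_singleton]
          push_cast
          omega
        · simp only [hr2, if_false]
          have hlen2 : ([( (cs.drop i).takeWhile (fun c => !PySem.Chars.isspace c)),
              ((cs.drop i).dropWhile (fun c => !PySem.Chars.isspace c)).dropWhile PySem.Chars.isspace].length) = 2 := rfl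
          rw [if_neg (by simp)]
          rw [show (1:Int) = ((1:Nat):Int) from rfl, PySem.List.pyGet?_natCast]
          simp only [List.getElem?_cons_succ, List.getElem?_cons_zero, Option.getD_some]
          push_cast
          omega
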